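-- pv_equiv track=rewrite | github.com/Louisenyholm/NLP-E21 | syllabus/classes/class4/frequencies.py | doc_freq
-- ===== SOURCE A (Python) =====
-- from collections import Counter
--
-- def doc_freq(doc_lst) -> dict:
--     """
--     Takes in a list of documents which each is a list of tokens (str) and return a dictionary of frequencies for each token over all the documents. E.g. {"Aarhus": 20, "the": 2301, ...}
--     """
--     #empty list (can only append to lists, not to counters)
--     all_counters_lst = []
--
--     #Iterating through docs
--     for doc in doc_lst:
--         #append to list a counter with frequencies in each doc
--         all_counters_lst.append(Counter(doc))
--
--     #Empty counter (.update works on counters, not lists)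
--     all_counters = Counter()
--
--     #iterating thorugh counters, updating (=adding)
--     for counter in all_counters_lst:
--         all_counters.update(counter)
--
--     return dict(all_counters)
-- ===== SOURCE B (Python) =====
-- def doc_freq(doc_lst) -> dict:
--     """
--     Takes in a list of documents which each is a list of tokens (str) and return
--     a dictionary of frequencies for each token over all the documents.
--     """
--     tokens = [tok for doc in doc_lst for tok in doc]
--     return {tok: tokens.count(tok) for tok in dict.fromkeys(tokens)}
-- ===== Notes on version B (the rewrite author's own statement) =====
-- stated objective: alternative
-- what changed: Instead of building per-document Counters and merging them into one Counter, B flattens all documents into a single token list, dedupes it by first appearance (dict.fromkeys), and computes each distinct token's total with tokens.count in a dict comprehension - no incremental tallying at all.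
import Mathlib
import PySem

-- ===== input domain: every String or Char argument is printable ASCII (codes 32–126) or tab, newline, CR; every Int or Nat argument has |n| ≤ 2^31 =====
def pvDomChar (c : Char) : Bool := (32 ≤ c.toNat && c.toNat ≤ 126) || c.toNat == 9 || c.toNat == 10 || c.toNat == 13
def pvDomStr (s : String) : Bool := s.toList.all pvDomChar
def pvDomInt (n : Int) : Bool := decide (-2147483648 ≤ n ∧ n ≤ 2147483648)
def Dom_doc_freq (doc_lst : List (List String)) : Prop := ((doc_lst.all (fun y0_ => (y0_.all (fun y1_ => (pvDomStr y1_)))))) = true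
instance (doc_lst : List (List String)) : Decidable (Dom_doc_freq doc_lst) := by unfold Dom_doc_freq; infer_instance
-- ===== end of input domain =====

-- B replaces A's build-Counters-then-merge with flatten + ordered dedup + tokens.count
-- per distinct token; objective: alternative (same result by a different algorithm).

-- ===== PORT A =====
-- for doc in doc_lst: all_counters_lst.append(Counter(doc));
-- then for counter in list: all_counters.update(counter)  (Counter.update adds counts,
-- keeping existing key positions and appending new keys in the argument's order);
-- finally dict(all_counters) = the items in insertion order.
def doc_freq (doc_lst : List (List String)) : List (String × Int) :=
  let all_counters_lst : List (PySem.Dict String Int) :=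
    doc_lst.foldl (fun acc doc => acc ++ [PySem.Dict.counter doc]) []
  let all_counters : PySem.Dict String Int :=
    all_counters_lst.foldl
      (fun acc c => c.items.foldl (fun a p => a.modify p.1 0 (· + p.2)) acc)
      PySem.Dict.empty
  all_counters.items

-- ===== PORT B =====
-- tokens = [tok for doc in doc_lst for tok in doc]
-- {tok: tokens.count(tok) for tok in dict.fromkeys(tokens)}
-- (dict.fromkeys = PySem.List.dedup; the comprehension's keys are distinct, so the
-- resulting dict's items are exactly this map in dedup order)
def doc_freq_alt (doc_lst : List (List String)) : List (String × Int) :=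
  let tokens : List String := doc_lst.foldl (fun acc doc => acc ++ doc) []
  (PySem.List.dedup tokens).map (fun tok => (tok, (tokens.count tok : Int)))

-- ===== PRECONDITION & SPEC =====
def Spec_doc_freq (doc_lst : List (List String)) (out : List (String × Int)) : Prop := out = doc_freq_alt doc_lst
instance (doc_lst : List (List String)) (out : List (String × Int)) : Decidable (Spec_doc_freq doc_lst out) := by unfold Spec_doc_freq; infer_instance

-- ===== CLAIM (what is proved, stated in full; the proofs are below) =====
def Claim_equal_doc_freq : Prop := ∀ (doc_lst : List (List String)), Dom_doc_freq doc_lst → Spec_doc_freq doc_lst (doc_freq doc_lst)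

-- ===== LEMMAS AND PROOFS =====

-- the comprehension loop builds the flattening
theorem foldl_append_eq_flatten {α : Type} (l : List (List α)) (acc : List α) :
    l.foldl (fun a xs => a ++ xs) acc = acc ++ l.flatten := by
  induction l generalizing acc with
  | nil => simp
  | cons x xs ih => simp [List.foldl_cons, ih]

-- value of the modify-add loop over a pair list
theorem getD_foldl_modify_addv (l : List (String × Int)) (d : PySem.Dict String Int) (k : String) :
    (l.foldl (fun a p => a.modify p.1 0 (· + p.2)) d).getD k 0
      = d.getD k 0 + ((l.filter (fun p => p.1 == k)).map (·.2)).sum := by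
  induction l generalizing d with
  | nil => simp
  | cons p ps ih =>
      simp only [List.foldl_cons, ih, List.filter_cons, PySem.Dict.getD_modify]
      by_cases h : p.1 = k
      · simp [h]
        ring
      · have h' : ¬ k = p.1 := fun e => h e.symm
        simp [h, h']

theorem sum_filter_map_nodup (s : List String) (v : String → Int) (k : String)
    (hnd : s.Nodup) :
    (((s.map (fun j => (j, v j))).filter (fun p => p.1 == k)).map (·.2)).sum
      = if k ∈ s then v k else 0 := by
  induction s with
  | nil => simp
  | cons x xs ih =>
      rw [List.nodup_cons] at hnd
      simp only [List.map_cons, List.filter_cons]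
      by_cases h : x = k
      · subst h
        simp only [beq_self_eq_true, if_true]
        have hxs : (xs.map (fun j => (j, v j))).filter (fun p => p.1 == x) = [] := by
          apply List.filter_eq_nil_iff.mpr
          intro p hp
          obtain ⟨j, hj, rfl⟩ := List.mem_map.mp hp
          simp only [beq_iff_eq]
          exact fun e => hnd.1 (e ▸ hj)
        simp [hxs]
      · have h' : (((x, v x).1 == k)) = false := by simp [h]
        rw [h']
        simp only [Bool.false_eq_true, if_false]
        rw [ih hnd.2]
        by_cases hm : k ∈ xs <;> simp [hm, Ne.symm h]

-- Set.update through ofList is the same update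
theorem set_update_ofList (s : List String) (xs : List String) :
    PySem.Set.update s (PySem.Set.ofList xs) = PySem.Set.update s xs := by
  rw [PySem.Set.update_eq_append_filter, PySem.Set.update_eq_append_filter,
      PySem.Set.ofList_ofList]

-- per-document step: merging Counter(doc) into d (A's step) equals the plain
-- token-by-token increment step (an intermediate form both sides reduce to)
theorem stepA_eq_tally (d : PySem.Dict String Int) (hnd : d.keys.Nodup) (doc : List String) :
    (PySem.Dict.counter doc).items.foldl (fun a p => a.modify p.1 0 (· + p.2)) d
      = doc.foldl (fun f tok => f.insert tok (f.getD tok 0 + 1)) d := by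
  apply PySem.Dict.ext
  have hndL : ((PySem.Dict.counter doc).items.foldl
      (fun a p => a.modify p.1 0 (· + p.2)) d).keys.Nodup := by
    exact PySem.Dict.nodup_keys_foldl_modify_key _ _ _ _ _ hnd
  have hndR : (doc.foldl (fun f tok => f.insert tok (f.getD tok 0 + 1)) d).keys.Nodup :=
    PySem.Dict.nodup_keys_foldl_insert doc _ d hnd
  rw [PySem.Dict.items_eq_map_keys _ hndL (0 : Int),
      PySem.Dict.items_eq_map_keys _ hndR (0 : Int)]
  have hkeys : ((PySem.Dict.counter doc).items.foldl
        (fun a p => a.modify p.1 0 (· + p.2)) d).keys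
      = (doc.foldl (fun f tok => f.insert tok (f.getD tok 0 + 1)) d).keys := by
    rw [PySem.Dict.keys_foldl_modify_key, PySem.Dict.keys_foldl_insert]
    have : (PySem.Dict.counter doc).items.map (fun p => p.1) = PySem.Set.ofList doc := by
      rw [PySem.Dict.items_counter]; simp [Function.comp_def]
    rw [this, set_update_ofList]
  rw [hkeys]
  apply List.map_congr_left
  intro k _
  congr 1
  rw [getD_foldl_modify_addv, PySem.Dict.getD_foldl_insert_add_one,
      PySem.Dict.items_counter,
      sum_filter_map_nodup _ _ _ (PySem.Set.nodup_ofList doc)]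
  by_cases h : k ∈ doc
  · simp [PySem.Set.mem_ofList, h]
  · have : doc.count k = 0 := List.count_eq_zero.mpr h
    simp [PySem.Set.mem_ofList, h, this]

-- A's merge loop equals one token-by-token tally over the docs
theorem fold_eq_tally (doc_lst : List (List String)) (d : PySem.Dict String Int)
    (hnd : d.keys.Nodup) :
    doc_lst.foldl
        (fun acc doc =>
          (PySem.Dict.counter doc).items.foldl (fun a p => a.modify p.1 0 (· + p.2)) acc) d
      = doc_lst.foldl
          (fun freq doc => doc.foldl (fun f tok => f.insert tok (f.getD tok 0 + 1)) freq) d := by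
  induction doc_lst generalizing d with
  | nil => rfl
  | cons doc rest ih =>
      simp only [List.foldl_cons]
      rw [stepA_eq_tally d hnd doc]
      exact ih _ (PySem.Dict.nodup_keys_foldl_insert doc _ d hnd)

-- ===== VERDICT (by name: the statement is the Claim_ definition above) =====
theorem doc_freq_spec : Claim_equal_doc_freq := by
  intro doc_lst _
  unfold Spec_doc_freq doc_freq doc_freq_alt
  simp only [PySem.List.foldl_append_singleton_eq_map, List.nil_append, List.foldl_map,
    foldl_append_eq_flatten]
  rw [fold_eq_tally doc_lst PySem.Dict.empty (by simp [PySem.Dict.keys_empty])]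
  rw [← List.foldl_flatten]
  set t := doc_lst.flatten with ht
  have hnd : (t.foldl (fun f tok => f.insert tok (f.getD tok 0 + 1))
      (PySem.Dict.empty : PySem.Dict String Int)).keys.Nodup :=
    PySem.Dict.nodup_keys_foldl_insert t _ _ (by simp [PySem.Dict.keys_empty])
  rw [PySem.Dict.items_eq_map_keys _ hnd (0 : Int)]
  rw [PySem.Dict.keys_foldl_insert]
  simp only [PySem.Dict.keys_empty, PySem.Set.update_nil_left, PySem.List.dedup_eq_ofList]
  apply List.map_congr_left
  intro k _
  simp [PySem.Dict.getD_foldl_insert_add_one]
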